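-- pv_equiv track=rewrite | github.com/purpledevilai/voice-socket-server | src/lib/sentence_stream.py | sentence_stream
-- ===== SOURCE A (Python) =====
-- def first_occurrence_end(text, substrings):
--     indices = [(text.find(sub) + len(sub))
--                for sub in substrings if text.find(sub) != -1]
--     # Return the lowest index, or -1 if no match is found
--     return min(indices) if indices else -1
--
-- def sentence_stream(token_generator):
--     text = ''
--     for token in token_generator:
--         text += token
--         split_index = first_occurrence_end(
--             text, [". ", "! ", "? ", ".\n", "!\n", "?\n"])
--         if (split_index != -1):
--             yield text[:split_index]
--             text = text[split_index:]
--     yield text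
-- ===== SOURCE B (Python) =====
-- def sentence_stream(token_generator):
--     buf = ""
--     scanned = 0  # no delimiter pair starts at any index < scanned - 1
--     for token in token_generator:
--         buf += token
--         i = scanned - 1 if scanned > 0 else 0
--         n = len(buf)
--         hit = -1
--         while i + 1 < n:
--             if buf[i] in ".!?" and buf[i + 1] in " \n":
--                 hit = i
--                 break
--             i += 1
--         if hit != -1:
--             yield buf[:hit + 2]
--             buf = buf[hit + 2:]
--             scanned = 0
--         else:
--             scanned = n
--     yield buf
-- ===== Notes on version B (the rewrite author's own statement) =====
-- stated objective: faster
-- what changed: B keeps a resume offset and scans each new chunk once (with a one-character overlap) for a delimiter pair, instead of A's six full-text str.find calls over the whole accumulated buffer on every token.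
import Mathlib
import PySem

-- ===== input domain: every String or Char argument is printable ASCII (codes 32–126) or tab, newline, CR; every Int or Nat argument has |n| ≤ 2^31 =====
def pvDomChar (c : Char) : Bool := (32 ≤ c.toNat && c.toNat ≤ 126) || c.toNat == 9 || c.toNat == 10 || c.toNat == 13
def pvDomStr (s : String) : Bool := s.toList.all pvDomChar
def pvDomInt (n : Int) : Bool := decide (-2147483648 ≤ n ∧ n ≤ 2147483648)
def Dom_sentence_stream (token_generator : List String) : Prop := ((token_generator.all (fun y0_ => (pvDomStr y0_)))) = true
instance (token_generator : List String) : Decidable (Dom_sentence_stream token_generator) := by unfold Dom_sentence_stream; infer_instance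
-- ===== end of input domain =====

-- B replaces A's per-token full-buffer rescan (six str.find calls over the whole
-- accumulated text) by one incremental scan that resumes at the previous token's
-- stopping point with a one-character overlap (objective: faster).
-- A and B are Python generators; the equivalence is about the list of yielded values.

-- ===== PORT A =====
def pvDelims : List (List Char) :=
  [['.', ' '], ['!', ' '], ['?', ' '], ['.', '\n'], ['!', '\n'], ['?', '\n']]

def first_occurrence_end (text : List Char) (substrings : List (List Char)) : Int :=
  let indices := substrings.filterMap (fun sub =>
    if PySem.Chars.find text sub ≠ -1 then some (PySem.Chars.find text sub + sub.length) else none)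
  match PySem.List.min? indices (fun x => x) with
  | some m => m
  | none => -1

def pvStepA (st : List String × List Char) (token : String) : List String × List Char :=
  let text := st.2 ++ token.toList
  let split_index := first_occurrence_end text pvDelims
  if split_index ≠ -1 then
    (st.1 ++ [String.ofList (PySem.List.slice text none (some split_index))],
     PySem.List.slice text (some split_index) none)
  else (st.1, text)

def sentence_stream (token_generator : List String) : List String :=
  let st := token_generator.foldl pvStepA ([], [])
  st.1 ++ [String.ofList st.2]

-- ===== PORT B =====
def pvIsDelim (a b : Char) : Bool :=
  (a == '.' || a == '!' || a == '?') && (b == ' ' || b == '\n')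

-- B's inner while loop: offset (relative to the start of the scan) of the first
-- delimiter pair, none when the scan runs off the end of the buffer
def pvScan : List Char → Option Nat
  | a :: b :: rest => if pvIsDelim a b then some 0 else (pvScan (b :: rest)).map (· + 1)
  | _ => none

def pvGoB : List String → List String → List Char → Nat → List String
  | [], acc, buf, _ => acc ++ [String.ofList buf]
  | token :: rest, acc, buf, scanned =>
    let buf' := buf ++ token.toList
    let s := if scanned > 0 then scanned - 1 else 0
    match (pvScan (buf'.drop s)).map (· + s) with
    | some hit => pvGoB rest (acc ++ [String.ofList (buf'.take (hit + 2))]) (buf'.drop (hit + 2)) 0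
    | none => pvGoB rest acc buf' buf'.length

def sentence_stream_alt (token_generator : List String) : List String :=
  pvGoB token_generator [] [] 0

-- ===== PRECONDITION & SPEC =====
def Spec_sentence_stream (token_generator : List String) (out : List String) : Prop := out = sentence_stream_alt token_generator
instance (token_generator : List String) (out : List String) : Decidable (Spec_sentence_stream token_generator out) := by unfold Spec_sentence_stream; infer_instance

-- ===== CLAIM (what is proved, stated in full; the proofs are below) =====
def Claim_equal_sentence_stream : Prop := ∀ (token_generator : List String), Dom_sentence_stream token_generator → Spec_sentence_stream token_generator (sentence_stream token_generator)

-- ===== LEMMAS AND PROOFS =====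

-- a delimiter pair of A's pattern list starts at index j of t
def pvPairAt (t : List Char) (j : Nat) : Prop := ∃ p ∈ pvDelims, p <+: t.drop j

theorem pvPairAt_zero (a b : Char) (r : List Char) :
    pvPairAt (a :: b :: r) 0 ↔ pvIsDelim a b = true := by
  constructor
  · rintro ⟨p, hp, hpre⟩
    fin_cases hp <;>
      · simp only [List.drop_zero, List.cons_prefix_cons] at hpre
        obtain ⟨rfl, rfl, -⟩ := hpre
        decide
  · intro h
    refine ⟨[a, b], ?_, by simp⟩
    simp only [pvIsDelim, Bool.and_eq_true, Bool.or_eq_true, beq_iff_eq] at h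
    obtain ⟨(h1 | h1) | h1, h2 | h2⟩ := h <;> subst h1 <;> subst h2 <;> simp [pvDelims]

theorem pvPairAt_succ (a : Char) (t : List Char) (j : Nat) :
    pvPairAt (a :: t) (j + 1) ↔ pvPairAt t j := Iff.rfl

theorem pvPairAt_short (t : List Char) (j : Nat) (h : t.length < j + 2) : ¬ pvPairAt t j := by
  rintro ⟨p, hp, hpre⟩
  have h2 : p.length = 2 := by fin_cases hp <;> rfl
  have := hpre.length_le
  simp [h2] at this
  omega

theorem pvScan_none (t : List Char) : pvScan t = none ↔ ∀ j, ¬ pvPairAt t j := by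
  induction t using pvScan.induct with
  | case1 a b rest h =>
    constructor
    · intro hc; simp [pvScan, h] at hc
    · intro hall; exact ((hall 0) ((pvPairAt_zero a b rest).mpr h)).elim
  | case2 a b rest h ih =>
    have hunf : pvScan (a :: b :: rest) = (pvScan (b :: rest)).map (· + 1) := by
      simp [pvScan, h]
    rw [hunf, Option.map_eq_none_iff, ih]
    constructor
    · intro hall j
      cases j with
      | zero => rw [pvPairAt_zero]; simp [h]
      | succ n => rw [pvPairAt_succ]; exact hall n
    · intro hall j
      exact fun hp => hall (j + 1) ((pvPairAt_succ a (b :: rest) j).mpr hp)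
  | case3 t h =>
    have hlen : t.length < 2 := by
      match t with
      | [] => simp
      | [c] => simp
      | c :: d :: ds => exact absurd rfl (h c d ds)
    constructor
    · intro _ j
      exact pvPairAt_short t j (by omega)
    · intro _
      match t with
      | [] => rfl
      | [c] => rfl

theorem pvScan_some (t : List Char) (i : Nat) (h : pvScan t = some i) :
    pvPairAt t i ∧ ∀ j < i, ¬ pvPairAt t j := by
  induction t using pvScan.induct generalizing i with
  | case1 a b rest hd =>
    have : i = 0 := by simp [pvScan, hd] at h; omega
    subst this
    exact ⟨(pvPairAt_zero a b rest).mpr hd, fun j hj => by omega⟩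
  | case2 a b rest hd ih =>
    have hunf : pvScan (a :: b :: rest) = (pvScan (b :: rest)).map (· + 1) := by
      simp [pvScan, hd]
    rw [hunf] at h
    obtain ⟨k, hk, rfl⟩ : ∃ k, pvScan (b :: rest) = some k ∧ i = k + 1 := by
      cases hsc : pvScan (b :: rest) with
      | none => rw [hsc] at h; simp at h
      | some k => rw [hsc] at h; simp at h; exact ⟨k, rfl, h.symm⟩
    obtain ⟨hp, hmin⟩ := ih k hk
    refine ⟨(pvPairAt_succ a (b :: rest) k).mpr hp, fun j hj => ?_⟩
    cases j with
    | zero => rw [pvPairAt_zero]; simp [hd]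
    | succ n => rw [pvPairAt_succ]; exact hmin n (by omega)
  | case3 t ht =>
    have : pvScan t = none := by
      match t with
      | [] => rfl
      | [c] => rfl
      | c :: d :: ds => exact absurd rfl (ht c d ds)
    rw [this] at h; exact absurd h (by simp)

theorem pvFoe_eq (t : List Char) :
    first_occurrence_end t pvDelims =
      (match pvScan t with | some i => (i : Int) + 2 | none => -1) := by
  cases hsc : pvScan t with
  | none =>
    have hall := (pvScan_none t).mp hsc
    have hfind : ∀ p ∈ pvDelims, PySem.Chars.find t p = -1 := by
      intro p hp
      rw [PySem.Chars.find_eq_neg_one_iff]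
      intro hinf
      obtain ⟨j, hj⟩ := (PySem.Chars.exists_prefix_drop_iff_isIn _ _).mpr
        ((PySem.Chars.isIn_iff_infix _ _).mpr hinf)
      exact hall j ⟨p, hp, hj⟩
    have hnil : pvDelims.filterMap (fun sub =>
        if PySem.Chars.find t sub ≠ -1 then some (PySem.Chars.find t sub + sub.length) else none) = [] := by
      rw [List.filterMap_eq_nil_iff]
      intro p hp
      simp [hfind p hp]
    unfold first_occurrence_end
    rw [hnil]
    rfl
  | some i =>
    obtain ⟨⟨p0, hp0, hpre0⟩, hmin⟩ := pvScan_some t i hsc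
    have hlen2 : ∀ p ∈ pvDelims, p.length = 2 := by
      intro p hp; fin_cases hp <;> rfl
    have hge : ∀ p ∈ pvDelims, PySem.Chars.find t p ≠ -1 → (i : Int) ≤ PySem.Chars.find t p := by
      intro p hp hne
      have h0 : 0 ≤ PySem.Chars.find t p := (PySem.Chars.find_nonneg_iff _ _).mpr
        ((PySem.Chars.find_ne_neg_one_iff _ _).mp hne)
      obtain ⟨hpre, _⟩ := PySem.Chars.find_spec h0
      by_contra hlt
      push Not at hlt
      exact hmin (PySem.Chars.find t p).toNat (by omega) ⟨p, hp, hpre⟩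
    have heq0 : PySem.Chars.find t p0 = (i : Int) := by
      have hinf : p0 <:+: t := (PySem.Chars.isIn_iff_infix _ _).mp
        ((PySem.Chars.exists_prefix_drop_iff_isIn _ _).mp ⟨i, hpre0⟩)
      have hne : PySem.Chars.find t p0 ≠ -1 := (PySem.Chars.find_ne_neg_one_iff _ _).mpr hinf
      have h0 : 0 ≤ PySem.Chars.find t p0 := (PySem.Chars.find_nonneg_iff _ _).mpr hinf
      obtain ⟨_, hfmin⟩ := PySem.Chars.find_spec h0
      have hle : (PySem.Chars.find t p0).toNat ≤ i := by
        by_contra hgt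
        push Not at hgt
        exact hfmin i hgt hpre0
      have := hge p0 hp0 hne
      omega
    set l := pvDelims.filterMap (fun sub =>
      if PySem.Chars.find t sub ≠ -1 then some (PySem.Chars.find t sub + sub.length) else none) with hl
    have hmem : (i : Int) + 2 ∈ l := by
      rw [hl, List.mem_filterMap]
      refine ⟨p0, hp0, ?_⟩
      rw [if_pos (by rw [heq0]; omega), heq0, hlen2 p0 hp0]
      norm_num
    have hlb : ∀ x ∈ l, (i : Int) + 2 ≤ x := by
      intro x hx
      rw [hl, List.mem_filterMap] at hx
      obtain ⟨p, hp, hfx⟩ := hx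
      split_ifs at hfx with hne
      have hx := Option.some_inj.mp hfx
      have hge' := hge p hp hne
      rw [hlen2 p hp] at hx
      omega
    cases hm : PySem.List.min? l (fun x => x) with
    | none =>
      rw [PySem.List.min?_eq_none_iff] at hm
      rw [hm] at hmem
      exact absurd hmem (by simp)
    | some m =>
      have h1 : (i : Int) + 2 ≤ m := hlb m (PySem.List.min?_mem hm)
      have h2 : m ≤ (i : Int) + 2 := PySem.List.min?_isMin hm ((i : Int) + 2) hmem
      have hfoe : first_occurrence_end t pvDelims =
          (match PySem.List.min? l (fun x => x) with | some mm => mm | none => -1) := by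
        rw [hl]
        rfl
      rw [hfoe, hm]
      simp
      exact le_antisymm h2 h1

theorem pvScan_drop : ∀ (t : List Char) (p : Nat), pvScan (t.take p) = none →
    (pvScan (t.drop (p - 1))).map (· + (p - 1)) = pvScan t := by
  intro t
  induction t using pvScan.induct with
  | case1 a b rest hd =>
    intro p h
    match p with
    | 0 => cases hx : pvScan (a :: b :: rest) <;> simp [hx]
    | 1 => cases hx : pvScan (a :: b :: rest) <;> simp [hx]
    | (n+2) =>
      exfalso
      simp [pvScan, hd] at h
  | case2 a b rest hd ih =>
    intro p h
    have hunf : ∀ (r : List Char), pvScan (a :: b :: r) = (pvScan (b :: r)).map (· + 1) := by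
      intro r; simp [pvScan, hd]
    match p with
    | 0 => cases hx : pvScan (a :: b :: rest) <;> simp [hx]
    | 1 => cases hx : pvScan (a :: b :: rest) <;> simp [hx]
    | (n+2) =>
      rw [List.take_succ_cons, List.take_succ_cons, hunf, Option.map_eq_none_iff] at h
      have h'' : pvScan ((b :: rest).take (n+1)) = none := by
        rw [List.take_succ_cons]; exact h
      have hih := ih (n+1) h''
      simp only [Nat.add_sub_cancel] at hih
      rw [hunf rest, show n + 2 - 1 = n + 1 from rfl, List.drop_succ_cons, ← hih, Option.map_map]
      cases pvScan ((b :: rest).drop n) <;> simp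
  | case3 t ht =>
    intro p h
    have h0 : pvScan t = none := by
      match t with
      | [] => rfl
      | [c] => rfl
      | c :: d :: ds => exact absurd rfl (ht c d ds)
    have h1 : pvScan (t.drop (p - 1)) = none := by
      rcases t with _ | ⟨c, _ | ⟨d, ds⟩⟩
      · simp [pvScan]
      · cases hk : p - 1 <;> simp [pvScan]
      · exact absurd rfl (ht c d ds)
    rw [h0, h1]
    rfl

theorem pvLoop_eq : ∀ (tokens : List String) (acc : List String) (text : List Char) (scanned : Nat),
    scanned ≤ text.length → pvScan (text.take scanned) = none →
    (let st := tokens.foldl pvStepA (acc, text); st.1 ++ [String.ofList st.2]) = pvGoB tokens acc text scanned := by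
  intro tokens
  induction tokens with
  | nil => intro acc text scanned _ _; rfl
  | cons token rest ih =>
    intro acc text scanned hle hnone
    set buf' := text ++ token.toList with hbuf
    have htake : buf'.take scanned = text.take scanned := by
      rw [hbuf, List.take_append_of_le_length hle]
    have hsc' : pvScan (buf'.take scanned) = none := by rw [htake]; exact hnone
    have hdrop := pvScan_drop buf' scanned hsc'
    have hs : (if scanned > 0 then scanned - 1 else 0) = scanned - 1 := by
      split_ifs <;> omega
    have hB : pvGoB (token :: rest) acc text scanned =
        (match pvScan buf' with
         | some hit => pvGoB rest (acc ++ [String.ofList (buf'.take (hit + 2))]) (buf'.drop (hit + 2)) 0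
         | none => pvGoB rest acc buf' buf'.length) := by
      simp only [pvGoB, ← hbuf, hs, hdrop]
    cases hx : pvScan buf' with
    | some i =>
      have hcast : ((i : Int) + 2).toNat = i + 2 := by omega
      have hfoe : first_occurrence_end buf' pvDelims = (i : Int) + 2 := by
        rw [pvFoe_eq buf', hx]
      have hA : pvStepA (acc, text) token =
          (acc ++ [String.ofList (buf'.take (i + 2))], buf'.drop (i + 2)) := by
        show (if first_occurrence_end buf' pvDelims ≠ -1
          then (acc ++ [String.ofList (PySem.List.slice buf' none (some (first_occurrence_end buf' pvDelims)))],
                PySem.List.slice buf' (some (first_occurrence_end buf' pvDelims)) none)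
          else (acc, buf')) =
          (acc ++ [String.ofList (buf'.take (i + 2))], buf'.drop (i + 2))
        rw [hfoe, if_pos (by omega)]
        rw [PySem.List.slice_to buf' (show (0:Int) ≤ (i : Int) + 2 by omega),
          PySem.List.slice_from buf' (show (0:Int) ≤ (i : Int) + 2 by omega), hcast]
      rw [hB, hx, List.foldl_cons, hA]
      exact ih _ _ 0 (Nat.zero_le _) rfl
    | none =>
      have hfoe : first_occurrence_end buf' pvDelims = -1 := by
        rw [pvFoe_eq buf', hx]
      have hA : pvStepA (acc, text) token = (acc, buf') := by
        show (if first_occurrence_end buf' pvDelims ≠ -1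
          then (acc ++ [String.ofList (PySem.List.slice buf' none (some (first_occurrence_end buf' pvDelims)))],
                PySem.List.slice buf' (some (first_occurrence_end buf' pvDelims)) none)
          else (acc, buf')) = (acc, buf')
        rw [hfoe, if_neg (by omega)]
      rw [hB, hx, List.foldl_cons, hA]
      exact ih _ _ buf'.length (le_refl _) (by rw [List.take_length]; exact hx)

-- ===== VERDICT (by name: the statement is the Claim_ definition above) =====
theorem sentence_stream_spec : Claim_equal_sentence_stream := by
  intro tg _
  unfold Spec_sentence_stream sentence_stream sentence_stream_alt
  exact pvLoop_eq tg [] [] 0 (Nat.zero_le _) rfl
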